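-- pv_equiv track=rewrite | github.com/5brian/4256 | labs/lab_7.py | weakly_connected
-- ===== SOURCE A (Python) =====
-- def bfs(graph, start):
--     visited = set([start])
--     queue = [start]
--
--     while queue:
--         node = queue.pop(0)
--         for neighbor in graph[node]:
--             if neighbor not in visited:
--                 visited.add(neighbor)
--                 queue.append(neighbor)
--
--     return visited
--
-- def weakly_connected(di):
--     if not di:
--         return True
--
--     undirected = {}
--     for node in di:
--         if node not in undirected:
--             undirected[node] = []
--         for neighbor in di[node]:
--             if neighbor not in undirected:
--                 undirected[neighbor] = []
--             if neighbor not in undirected[node]: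
--                 undirected[node].append(neighbor)
--             if node not in undirected[neighbor]:
--                 undirected[neighbor].append(node)
--
--     start_node = next(iter(undirected))
--     visited = bfs(undirected, start_node)
--
--     return len(visited) == len(undirected)
-- ===== SOURCE B (Python) =====
-- def weakly_connected(di):
--     # Component labeling with weighted merging: every node starts as its own labeled
--     # class; each edge merges the two classes by relabeling the smaller one.
--     # Connected iff exactly one class label remains. No BFS, no adjacency structure.
--     if not di:
--         return True
--
--     comp = {}     # node -> class label
--     members = {}  # class label -> list of its nodes
--     for node in di:
--         if node not in comp:
--             comp[node] = node
--             members[node] = [node]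
--         for v in di[node]:
--             if v not in comp:
--                 comp[v] = v
--                 members[v] = [v]
--             a, b = comp[node], comp[v]
--             if a != b:
--                 if len(members[a]) < len(members[b]):
--                     a, b = b, a
--                 for k in members[b]:
--                     comp[k] = a
--                 members[a].extend(members[b])
--                 del members[b]
--
--     return len(members) == 1
-- ===== Notes on version B (the rewrite author's own statement) =====
-- stated objective: faster
-- what changed: Replaces A's undirected-adjacency construction (with O(deg) duplicate scans per edge) plus list-queue BFS by component labeling with weighted merging: every node starts as its own labeled class, each edge merges the two classes by relabeling the smaller one via a label-to-members index, and the graph is weakly connected iff one class label remains.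
import Mathlib
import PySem

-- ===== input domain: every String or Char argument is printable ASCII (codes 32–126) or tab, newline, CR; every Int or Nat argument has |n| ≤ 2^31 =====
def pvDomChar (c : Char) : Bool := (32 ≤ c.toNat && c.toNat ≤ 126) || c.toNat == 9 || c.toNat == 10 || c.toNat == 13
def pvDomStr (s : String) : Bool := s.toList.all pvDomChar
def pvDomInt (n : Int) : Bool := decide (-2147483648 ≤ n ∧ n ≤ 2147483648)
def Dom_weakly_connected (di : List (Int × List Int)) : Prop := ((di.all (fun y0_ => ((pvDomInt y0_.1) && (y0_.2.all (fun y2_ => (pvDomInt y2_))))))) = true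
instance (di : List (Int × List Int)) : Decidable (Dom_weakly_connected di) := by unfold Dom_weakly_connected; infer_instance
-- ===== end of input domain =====

-- B replaces A's undirected-adjacency + BFS by component labeling with weighted merging
-- (each edge merges two label classes, relabeling the smaller; connected iff one label
-- remains); measured faster on large inputs; return values agree everywhere.

-- ===== PORT A =====
-- the Python argument is a dict; decode the association list with dict insertion semantics (shared by both ports)
def pyDictOf (di : List (Int × List Int)) : PySem.Dict Int (List Int) :=
  di.foldl (fun d p => d.insert p.1 p.2) ⟨[]⟩

-- body of A's inner 'for neighbor in di[node]' loop
def undAddEdge (u : Int) (und : PySem.Dict Int (List Int)) (nb : Int) : PySem.Dict Int (List Int) :=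
  let a1 := if und.contains nb then und else und.insert nb []
  let a2 := if (a1.getD u []).contains nb then a1 else a1.modify u [] (fun l => l ++ [nb])
  if (a2.getD nb []).contains u then a2 else a2.modify nb [] (fun l => l ++ [u])

def buildUndirected (items : List (Int × List Int)) : PySem.Dict Int (List Int) :=
  items.foldl (fun und p =>
    p.2.foldl (undAddEdge p.1) (if und.contains p.1 then und else und.insert p.1 [])) ⟨[]⟩

-- A's 'while queue' loop; fuel = number of keys is always enough (each node enters the queue at most once)
def bfsLoop (graph : PySem.Dict Int (List Int)) : Nat → List Int → PySem.Set Int → PySem.Set Int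
  | _, [], visited => visited
  | 0, _ :: _, visited => visited
  | Nat.succ fuel, node :: queue, visited =>
    let st := (graph.getD node []).foldl
      (fun (st : PySem.Set Int × List Int) neighbor =>
        if st.1.contains neighbor then st else (PySem.Set.add st.1 neighbor, st.2 ++ [neighbor]))
      (visited, queue)
    bfsLoop graph fuel st.2 st.1

def bfs (graph : PySem.Dict Int (List Int)) (start : Int) : PySem.Set Int :=
  bfsLoop graph graph.items.length [start] (PySem.Set.ofList [start])

def weakly_connected (di : List (Int × List Int)) : Bool :=
  let d := pyDictOf di
  if d.items.isEmpty then true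
  else
    let undirected := buildUndirected d.items
    match undirected.keys with
    | [] => true
    | start :: _ =>
      let visited := bfs undirected start
      visited.length == undirected.items.length

-- ===== PORT B =====
-- B's 'if x not in comp' bookkeeping: a fresh node gets its own label and singleton class
def ensureNode (x : Int) (st : PySem.Dict Int Int × PySem.Dict Int (List Int)) :
    PySem.Dict Int Int × PySem.Dict Int (List Int) :=
  if st.1.contains x then st else (st.1.insert x x, st.2.insert x [x])

-- body of B's inner 'for v in di[node]' loop: merge the two label classes, relabeling the smaller
def unionStep (node : Int) (st : PySem.Dict Int Int × PySem.Dict Int (List Int)) (v : Int) :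
    PySem.Dict Int Int × PySem.Dict Int (List Int) :=
  let st1 := ensureNode v st
  let a := st1.1.getD node 0
  let b := st1.1.getD v 0
  if a != b then
    let ab := if (st1.2.getD a []).length < (st1.2.getD b []).length then (b, a) else (a, b)
    ((st1.2.getD ab.2 []).foldl (fun c k => c.insert k ab.1) st1.1,
     (st1.2.insert ab.1 (st1.2.getD ab.1 [] ++ st1.2.getD ab.2 [])).erase ab.2)
  else st1

def weakly_connected_alt (di : List (Int × List Int)) : Bool :=
  let d := pyDictOf di
  if d.items.isEmpty then true
  else
    let st := d.items.foldl (fun st p => p.2.foldl (unionStep p.1) (ensureNode p.1 st))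
      ((⟨[]⟩, ⟨[]⟩) : PySem.Dict Int Int × PySem.Dict Int (List Int))
    st.2.size == 1

-- ===== PRECONDITION & SPEC =====
def Spec_weakly_connected (di : List (Int × List Int)) (out : Bool) : Prop := out = weakly_connected_alt di
instance (di : List (Int × List Int)) (out : Bool) : Decidable (Spec_weakly_connected di out) := by unfold Spec_weakly_connected; infer_instance

-- ===== CLAIM (what is proved, stated in full; the proofs are below) =====
def Claim_equal_weakly_connected : Prop := ∀ (di : List (Int × List Int)), Dom_weakly_connected di → Spec_weakly_connected di (weakly_connected di)

-- ===== LEMMAS AND PROOFS =====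

-- the nodes and (directed) edges the two programs read off the dict's items
def nodesOf (items : List (Int × List Int)) : List Int := items.flatMap (fun p => p.1 :: p.2)
def edgesOf (items : List (Int × List Int)) : List (Int × Int) :=
  items.flatMap (fun p => p.2.map (fun v => (p.1, v)))

-- one undirected step along an edge list, and its reflexive-transitive closure (weak connectivity)
abbrev EStep (es : List (Int × Int)) (a b : Int) : Prop := (a, b) ∈ es ∨ (b, a) ∈ es
abbrev EConn (es : List (Int × Int)) : Int → Int → Prop := Relation.ReflTransGen (EStep es)

theorem econn_symm (es : List (Int × Int)) (a b : Int) (h : EConn es a b) : EConn es b a := by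
  induction h with
  | refl => exact Relation.ReflTransGen.refl
  | tail _ h2 ih => exact Relation.ReflTransGen.trans (Relation.ReflTransGen.single (Or.symm h2)) ih

theorem econn_mono (es es' : List (Int × Int)) (hsub : ∀ e ∈ es, e ∈ es') {a b : Int}
    (h : EConn es a b) : EConn es' a b :=
  Relation.ReflTransGen.mono (fun _ _ huv => huv.imp (hsub _) (hsub _)) h

theorem econn_append (es : List (Int × Int)) (u v x y : Int) :
    EConn (es ++ [(u, v)]) x y ↔
      EConn es x y ∨ (EConn es x u ∧ EConn es v y) ∨ (EConn es x v ∧ EConn es u y) := by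
  constructor
  · intro h
    induction h with
    | refl => exact Or.inl Relation.ReflTransGen.refl
    | @tail c d h1 h2 ih =>
      have hstep : EStep es c d ∨ (c = u ∧ d = v) ∨ (c = v ∧ d = u) := by
        rcases h2 with h2 | h2 <;> rcases List.mem_append.mp h2 with h3 | h3
        · exact Or.inl (Or.inl h3)
        · simp only [List.mem_singleton, Prod.mk.injEq] at h3
          exact Or.inr (Or.inl ⟨h3.1, h3.2⟩)
        · exact Or.inl (Or.inr h3)
        · simp only [List.mem_singleton, Prod.mk.injEq] at h3
          exact Or.inr (Or.inr ⟨h3.2, h3.1⟩)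
      rcases hstep with hs | ⟨rfl, rfl⟩ | ⟨rfl, rfl⟩
      · rcases ih with ih | ⟨ha, hb⟩ | ⟨ha, hb⟩
        · exact Or.inl (ih.tail hs)
        · exact Or.inr (Or.inl ⟨ha, hb.tail hs⟩)
        · exact Or.inr (Or.inr ⟨ha, hb.tail hs⟩)
      · rcases ih with ih | ⟨ha, hb⟩ | ⟨ha, hb⟩
        · exact Or.inr (Or.inl ⟨ih, Relation.ReflTransGen.refl⟩)
        · exact Or.inl (ha.trans (econn_symm es _ _ hb))
        · exact Or.inl ha
      · rcases ih with ih | ⟨ha, hb⟩ | ⟨ha, hb⟩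
        · exact Or.inr (Or.inr ⟨ih, Relation.ReflTransGen.refl⟩)
        · exact Or.inl ha
        · exact Or.inl (ha.trans (econn_symm es _ _ hb))
  · have hbr : EConn (es ++ [(u, v)]) u v :=
      Relation.ReflTransGen.single (Or.inl (List.mem_append.mpr (Or.inr (List.mem_singleton.mpr rfl))))
    have hmono : ∀ {a b : Int}, EConn es a b → EConn (es ++ [(u, v)]) a b :=
      fun h => econn_mono es _ (fun e he => List.mem_append.mpr (Or.inl he)) h
    rintro (h | ⟨h1, h2⟩ | ⟨h1, h2⟩)
    · exact hmono h
    · exact ((hmono h1).trans hbr).trans (hmono h2)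
    · exact ((hmono h1).trans (econn_symm _ u v hbr)).trans (hmono h2)

theorem econn_eq_of_not_mem (es : List (Int × Int)) (K : List Int)
    (hends : ∀ e ∈ es, e.1 ∈ K ∧ e.2 ∈ K) (x y : Int) (hx : x ∉ K) (h : EConn es x y) : x = y := by
  rcases Relation.ReflTransGen.cases_head h with rfl | ⟨c, hstep, _⟩
  · rfl
  · exfalso
    rcases hstep with hs | hs
    · exact hx (hends _ hs).1
    · exact hx (hends _ hs).2

theorem contains_eq_false_of_not_mem {ν : Type} (d : PySem.Dict Int ν) (x : Int)
    (hx : x ∉ d.keys) : d.contains x = false := by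
  cases h : d.contains x
  · rfl
  · exact absurd ((PySem.Dict.contains_iff_mem_keys d x).mp h) hx

theorem nodup_append_singleton {l : List Int} {x : Int} (h : l.Nodup) (hx : x ∉ l) :
    (l ++ [x]).Nodup := by
  simp [List.nodup_append, h]
  intro a ha he
  exact hx (by rw [← he]; exact ha)

theorem ensure_keys {ν : Type} (d : PySem.Dict Int ν) (k : Int) (v0 : ν) :
    (∀ x, x ∈ (if d.contains k then d else d.insert k v0).keys ↔ x ∈ d.keys ∨ x = k) ∧
    (d.keys.Nodup → (if d.contains k then d else d.insert k v0).keys.Nodup) := by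
  split
  · next h =>
    have hk := (PySem.Dict.contains_iff_mem_keys d k).mp h
    refine ⟨fun x => ⟨Or.inl, ?_⟩, id⟩
    rintro (h' | rfl)
    · exact h'
    · exact hk
  · next h =>
    have hk : k ∉ d.keys := fun hm => h ((PySem.Dict.contains_iff_mem_keys d k).mpr hm)
    rw [PySem.Dict.keys_insert_of_not_contains d v0 (contains_eq_false_of_not_mem d k hk)]
    exact ⟨fun x => by simp, fun hnd => nodup_append_singleton hnd hk⟩

-- ===== A-side: the built adjacency dict, characterised by nodesOf / edgesOf =====

theorem getD_ensure_mem (d : PySem.Dict Int (List Int)) (k x y : Int) :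
    y ∈ (if d.contains k then d else d.insert k []).getD x [] ↔ y ∈ d.getD x [] := by
  split
  · exact Iff.rfl
  · next h =>
    rw [PySem.Dict.getD_insert]
    split
    · next hx =>
      subst hx
      rw [PySem.Dict.getD_of_not_contains d [] (by
        cases hc : d.contains x
        · rfl
        · exact absurd hc (by simpa using h))]
    · exact Iff.rfl

theorem addList_getD_mem (d : PySem.Dict Int (List Int)) (u nb x y : Int) :
    y ∈ (if (d.getD u []).contains nb then d else d.modify u [] (fun l => l ++ [nb])).getD x [] ↔
      y ∈ d.getD x [] ∨ (x = u ∧ y = nb) := by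
  split
  · next h =>
    refine ⟨Or.inl, ?_⟩
    rintro (h' | ⟨rfl, rfl⟩)
    · exact h'
    · simpa using h
  · next h =>
    simp only [PySem.Dict.modify]
    rw [PySem.Dict.getD_insert]
    split
    · next hx =>
      subst hx
      simp only [List.mem_append, List.mem_singleton]
      tauto
    · next hx => simp [hx]

theorem undAddEdge_getD_mem (u nb : Int) (d : PySem.Dict Int (List Int)) (x y : Int) :
    y ∈ (undAddEdge u d nb).getD x [] ↔
      y ∈ d.getD x [] ∨ (x = u ∧ y = nb) ∨ (x = nb ∧ y = u) := by
  simp only [undAddEdge]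
  rw [addList_getD_mem, addList_getD_mem, getD_ensure_mem]
  tauto

theorem addList_keys {d : PySem.Dict Int (List Int)} {u : Int} (nb : Int) (hu : u ∈ d.keys) :
    (if (d.getD u []).contains nb then d else d.modify u [] (fun l => l ++ [nb])).keys = d.keys := by
  split
  · rfl
  · simp only [PySem.Dict.modify]
    exact PySem.Dict.keys_insert_of_contains d _ ((PySem.Dict.contains_iff_mem_keys d u).mpr hu)

theorem undAddEdge_keys (u nb : Int) (d : PySem.Dict Int (List Int)) (hu : u ∈ d.keys) :
    (∀ x, x ∈ (undAddEdge u d nb).keys ↔ x ∈ d.keys ∨ x = nb) ∧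
    (d.keys.Nodup → (undAddEdge u d nb).keys.Nodup) := by
  simp only [undAddEdge]
  obtain ⟨K1, N1⟩ := ensure_keys d nb ([] : List Int)
  set a1 := if d.contains nb then d else d.insert nb [] with ha1
  have hu1 : u ∈ a1.keys := (K1 u).mpr (Or.inl hu)
  have h2 : (if (a1.getD u []).contains nb then a1
      else a1.modify u [] (fun l => l ++ [nb])).keys = a1.keys := addList_keys nb hu1
  set a2 := if (a1.getD u []).contains nb then a1
      else a1.modify u [] (fun l => l ++ [nb]) with ha2
  have hnb2 : nb ∈ a2.keys := by rw [h2]; exact (K1 nb).mpr (Or.inr rfl)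
  have h3 : (if (a2.getD nb []).contains u then a2
      else a2.modify nb [] (fun l => l ++ [u])).keys = a2.keys := addList_keys u hnb2
  rw [h3, h2]
  exact ⟨K1, N1⟩

theorem buildA_inner (u : Int) (nbrs : List Int) :
    ∀ d : PySem.Dict Int (List Int), u ∈ d.keys →
      (∀ x, x ∈ (nbrs.foldl (undAddEdge u) d).keys ↔ x ∈ d.keys ∨ x ∈ nbrs) ∧
      (d.keys.Nodup → (nbrs.foldl (undAddEdge u) d).keys.Nodup) ∧
      (∀ x y, y ∈ (nbrs.foldl (undAddEdge u) d).getD x [] ↔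
        y ∈ d.getD x [] ∨ (x = u ∧ y ∈ nbrs) ∨ (y = u ∧ x ∈ nbrs)) := by
  induction nbrs with
  | nil => exact fun d _ => ⟨fun x => by simp, id, fun x y => by simp⟩
  | cons nb t ih =>
    intro d hu
    simp only [List.foldl_cons]
    obtain ⟨K, N⟩ := undAddEdge_keys u nb d hu
    have hu' : u ∈ (undAddEdge u d nb).keys := (K u).mpr (Or.inl hu)
    obtain ⟨K', N', M'⟩ := ih (undAddEdge u d nb) hu'
    refine ⟨fun x => ?_, fun h => N' (N h), fun x y => ?_⟩
    · rw [K' x, K x]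
      simp only [List.mem_cons]
      tauto
    · rw [M' x y, undAddEdge_getD_mem u nb d x y]
      constructor
      · rintro ((h | ⟨rfl, rfl⟩ | ⟨rfl, rfl⟩) | ⟨rfl, h⟩ | ⟨rfl, h⟩)
        · exact Or.inl h
        · exact Or.inr (Or.inl ⟨rfl, List.mem_cons_self⟩)
        · exact Or.inr (Or.inr ⟨rfl, List.mem_cons_self⟩)
        · exact Or.inr (Or.inl ⟨rfl, List.mem_cons_of_mem _ h⟩)
        · exact Or.inr (Or.inr ⟨rfl, List.mem_cons_of_mem _ h⟩)
      · rintro (h | ⟨rfl, h⟩ | ⟨rfl, h⟩)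
        · exact Or.inl (Or.inl h)
        · rcases List.mem_cons.mp h with rfl | h
          · exact Or.inl (Or.inr (Or.inl ⟨rfl, rfl⟩))
          · exact Or.inr (Or.inl ⟨rfl, h⟩)
        · rcases List.mem_cons.mp h with rfl | h
          · exact Or.inl (Or.inr (Or.inr ⟨rfl, rfl⟩))
          · exact Or.inr (Or.inr ⟨rfl, h⟩)

theorem nodesOf_cons (p : Int × List Int) (t : List (Int × List Int)) :
    nodesOf (p :: t) = p.1 :: (p.2 ++ nodesOf t) := by simp [nodesOf]

theorem edgesOf_cons (p : Int × List Int) (t : List (Int × List Int)) :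
    edgesOf (p :: t) = p.2.map (fun v => (p.1, v)) ++ edgesOf t := by simp [edgesOf]

theorem estep_append (es1 es2 : List (Int × Int)) (x y : Int) :
    EStep (es1 ++ es2) x y ↔ EStep es1 x y ∨ EStep es2 x y := by
  simp only [EStep, List.mem_append]
  tauto

theorem estep_map (p : Int × List Int) (x y : Int) :
    EStep (p.2.map (fun v => (p.1, v))) x y ↔ (x = p.1 ∧ y ∈ p.2) ∨ (y = p.1 ∧ x ∈ p.2) := by
  simp only [EStep, List.mem_map, Prod.mk.injEq]
  constructor
  · rintro (⟨v, hv, h1, h2⟩ | ⟨v, hv, h1, h2⟩)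
    · exact Or.inl ⟨h1.symm, h2 ▸ hv⟩
    · exact Or.inr ⟨h1.symm, h2 ▸ hv⟩
  · rintro (⟨rfl, hy⟩ | ⟨rfl, hx⟩)
    · exact Or.inl ⟨y, hy, rfl, rfl⟩
    · exact Or.inr ⟨x, hx, rfl, rfl⟩

theorem buildA_outer (items : List (Int × List Int)) :
    ∀ d : PySem.Dict Int (List Int),
      (∀ x, x ∈ (items.foldl (fun und p =>
          p.2.foldl (undAddEdge p.1) (if und.contains p.1 then und else und.insert p.1 [])) d).keys ↔
        x ∈ d.keys ∨ x ∈ nodesOf items) ∧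
      (d.keys.Nodup → (items.foldl (fun und p =>
          p.2.foldl (undAddEdge p.1) (if und.contains p.1 then und else und.insert p.1 [])) d).keys.Nodup) ∧
      (∀ x y, y ∈ (items.foldl (fun und p =>
          p.2.foldl (undAddEdge p.1) (if und.contains p.1 then und else und.insert p.1 [])) d).getD x [] ↔
        y ∈ d.getD x [] ∨ EStep (edgesOf items) x y) := by
  induction items with
  | nil =>
    exact fun d => ⟨fun x => by simp [nodesOf], id, fun x y => by simp [edgesOf, EStep]⟩
  | cons p t ih =>
    intro d
    simp only [List.foldl_cons]
    obtain ⟨KE, NE⟩ := ensure_keys d p.1 ([] : List Int)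
    have hp1 : p.1 ∈ (if d.contains p.1 then d else d.insert p.1 []).keys := (KE p.1).mpr (Or.inr rfl)
    obtain ⟨KI, NI, MI⟩ := buildA_inner p.1 p.2 _ hp1
    obtain ⟨KO, NO, MO⟩ := ih (p.2.foldl (undAddEdge p.1) (if d.contains p.1 then d else d.insert p.1 []))
    refine ⟨fun x => ?_, fun h => NO (NI (NE h)), fun x y => ?_⟩
    · rw [KO x, KI x, KE x, nodesOf_cons]
      simp only [List.mem_cons, List.mem_append]
      tauto
    · rw [MO x y, MI x y, getD_ensure_mem, edgesOf_cons, estep_append, estep_map]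
      tauto

theorem build_facts (items : List (Int × List Int)) :
    (∀ x, x ∈ (buildUndirected items).keys ↔ x ∈ nodesOf items) ∧
    (buildUndirected items).keys.Nodup ∧
    (∀ x y, y ∈ (buildUndirected items).getD x [] ↔ EStep (edgesOf items) x y) := by
  obtain ⟨K, N, M⟩ := buildA_outer items ⟨[]⟩
  have he : buildUndirected items = items.foldl (fun und p =>
      p.2.foldl (undAddEdge p.1) (if und.contains p.1 then und else und.insert p.1 [])) ⟨[]⟩ := rfl
  have hkeys : (PySem.Dict.mk ([] : List (Int × List Int))).keys = [] := rfl
  refine ⟨fun x => ?_, ?_, fun x y => ?_⟩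
  · rw [he, K x, hkeys]; simp
  · rw [he]; exact N (by rw [hkeys]; exact List.nodup_nil)
  · rw [he, M x y]
    have hg : (PySem.Dict.mk ([] : List (Int × List Int))).getD x [] = [] := rfl
    rw [hg]; simp

theorem estep_nodes (items : List (Int × List Int)) (x y : Int)
    (h : EStep (edgesOf items) x y) : x ∈ nodesOf items ∧ y ∈ nodesOf items := by
  have key : ∀ a b : Int, (a, b) ∈ edgesOf items → a ∈ nodesOf items ∧ b ∈ nodesOf items := by
    intro a b hab
    simp only [edgesOf, List.mem_flatMap, List.mem_map, Prod.mk.injEq] at hab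
    obtain ⟨p, hp, v, hv, h1, h2⟩ := hab
    subst h1; subst h2
    constructor <;> simp only [nodesOf, List.mem_flatMap]
    · exact ⟨p, hp, List.mem_cons_self⟩
    · exact ⟨p, hp, List.mem_cons_of_mem _ hv⟩
  rcases h with h | h
  · exact key x y h
  · exact (key y x h).symm

-- reachability along A's adjacency dict
def Reach (g : PySem.Dict Int (List Int)) (a b : Int) : Prop :=
  Relation.ReflTransGen (fun u v => v ∈ g.getD u []) a b

theorem reach_iff_econn (items : List (Int × List Int)) (x y : Int) :
    Reach (buildUndirected items) x y ↔ EConn (edgesOf items) x y := by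
  obtain ⟨_, _, M⟩ := build_facts items
  constructor <;> intro h
  · exact Relation.ReflTransGen.mono (fun a b hab => (M a b).mp hab) h
  · exact Relation.ReflTransGen.mono (fun a b hab => (M a b).mpr hab) h

theorem reach_mem (g : PySem.Dict Int (List Int)) (r : List Int) (s x : Int)
    (hs : s ∈ r) (hcl : ∀ v ∈ r, ∀ n ∈ g.getD v [], n ∈ r) (h : Reach g s x) : x ∈ r := by
  induction h with
  | refl => exact hs
  | tail _ hstep ih => exact hcl _ ih _ hstep

-- A's inner fold over the popped node's neighbours
theorem foldA_spec (nbrs : List Int) :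
    ∀ (vis : PySem.Set Int) (q : List Int),
      (∀ x, x ∈ (nbrs.foldl
        (fun (st : PySem.Set Int × List Int) neighbor =>
          if st.1.contains neighbor then st else (PySem.Set.add st.1 neighbor, st.2 ++ [neighbor]))
        (vis, q)).1 ↔ x ∈ vis ∨ x ∈ nbrs) ∧
      (∀ x, x ∈ (nbrs.foldl
        (fun (st : PySem.Set Int × List Int) neighbor =>
          if st.1.contains neighbor then st else (PySem.Set.add st.1 neighbor, st.2 ++ [neighbor]))
        (vis, q)).2 ↔ x ∈ q ∨ (x ∈ nbrs ∧ x ∉ vis)) ∧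
      (vis.Nodup → (nbrs.foldl
        (fun (st : PySem.Set Int × List Int) neighbor =>
          if st.1.contains neighbor then st else (PySem.Set.add st.1 neighbor, st.2 ++ [neighbor]))
        (vis, q)).1.Nodup) ∧
      (nbrs.foldl
        (fun (st : PySem.Set Int × List Int) neighbor =>
          if st.1.contains neighbor then st else (PySem.Set.add st.1 neighbor, st.2 ++ [neighbor]))
        (vis, q)).2.length + vis.length =
      (nbrs.foldl
        (fun (st : PySem.Set Int × List Int) neighbor =>
          if st.1.contains neighbor then st else (PySem.Set.add st.1 neighbor, st.2 ++ [neighbor]))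
        (vis, q)).1.length + q.length := by
  induction nbrs with
  | nil =>
    intro vis q
    exact ⟨fun x => by simp, fun x => by simp, fun h => h, Nat.add_comm _ _⟩
  | cons nb t ih =>
    intro vis q
    simp only [List.foldl_cons]
    by_cases h : PySem.Set.contains vis nb = true
    · have hm : nb ∈ vis := by
        simpa [PySem.Set.contains, List.contains_iff_mem] using h
      rw [if_pos h]
      obtain ⟨M1, M2, ND, L⟩ := ih vis q
      refine ⟨fun x => ?_, fun x => ?_, ND, L⟩
      · rw [M1 x]
        constructor
        · rintro (hx | hx)
          · exact Or.inl hx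
          · exact Or.inr (List.mem_cons_of_mem _ hx)
        · rintro (hx | hx)
          · exact Or.inl hx
          · rcases List.mem_cons.mp hx with rfl | hx
            · exact Or.inl hm
            · exact Or.inr hx
      · rw [M2 x]
        constructor
        · rintro (hx | ⟨hx1, hx2⟩)
          · exact Or.inl hx
          · exact Or.inr ⟨List.mem_cons_of_mem _ hx1, hx2⟩
        · rintro (hx | ⟨hx1, hx2⟩)
          · exact Or.inl hx
          · rcases List.mem_cons.mp hx1 with rfl | hx1
            · exact absurd hm hx2
            · exact Or.inr ⟨hx1, hx2⟩
    · have hm : nb ∉ vis := by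
        simpa [PySem.Set.contains, List.contains_iff_mem] using h
      rw [if_neg h]
      have hadd : PySem.Set.add vis nb = vis ++ [nb] := by
        simp only [PySem.Set.add]
        rw [if_neg h]
      rw [hadd]
      obtain ⟨M1, M2, ND, L⟩ := ih (vis ++ [nb]) (q ++ [nb])
      refine ⟨fun x => ?_, fun x => ?_, fun hnd => ?_, ?_⟩
      · rw [M1 x]
        simp only [List.mem_append, List.mem_cons, List.not_mem_nil, or_false]
        tauto
      · rw [M2 x]
        simp only [List.mem_append, List.mem_cons, List.not_mem_nil, or_false]
        constructor
        · rintro ((hx | rfl) | ⟨hx1, hx2⟩)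
          · exact Or.inl hx
          · exact Or.inr ⟨Or.inl rfl, hm⟩
          · exact Or.inr ⟨Or.inr hx1, fun hv => hx2 (Or.inl hv)⟩
        · rintro (hx | ⟨hx1 | hx1, hx2⟩)
          · exact Or.inl (Or.inl hx)
          · exact Or.inl (Or.inr hx1)
          · by_cases hxe : x = nb
            · exact Or.inl (Or.inr hxe)
            · exact Or.inr ⟨hx1, by simp [hx2, hxe]⟩
      · exact ND (nodup_append_singleton hnd hm)
      · simp only [List.length_append, List.length_singleton] at L ⊢
        omega

-- the queue BFS loop computes exactly: old visited plus everything reachable from the queue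
theorem bfsLoop_spec (g : PySem.Dict Int (List Int)) (U : List Int)
    (hU : ∀ u v, v ∈ g.getD u [] → v ∈ U) :
    ∀ (fuel : Nat) (queue : List Int) (visited : PySem.Set Int),
      visited.Nodup →
      (∀ q ∈ queue, q ∈ visited) →
      (∀ v ∈ visited, v ∉ queue → ∀ n ∈ g.getD v [], n ∈ visited) →
      (∀ v ∈ visited, v ∈ U) →
      queue.length + U.length ≤ fuel + visited.length →
      (∀ x, x ∈ bfsLoop g fuel queue visited → x ∈ visited ∨ ∃ q ∈ queue, Reach g q x) ∧
      (∀ x ∈ visited, x ∈ bfsLoop g fuel queue visited) ∧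
      (∀ v ∈ bfsLoop g fuel queue visited, ∀ n ∈ g.getD v [], n ∈ bfsLoop g fuel queue visited) ∧
      (bfsLoop g fuel queue visited).Nodup := by
  intro fuel
  induction fuel with
  | zero =>
    intro queue visited hnd hqv hcl hsub hfuel
    cases queue with
    | nil =>
      simp only [bfsLoop]
      exact ⟨fun x hx => Or.inl hx, fun x h => h,
        fun v hv n hn => hcl v hv (List.not_mem_nil) n hn, hnd⟩
    | cons node q =>
      exfalso
      have := (hnd.subperm (fun x hx => hsub x hx)).length_le
      simp only [List.length_cons] at hfuel
      omega
  | succ fuel ih =>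
    intro queue visited hnd hqv hcl hsub hfuel
    cases queue with
    | nil =>
      simp only [bfsLoop]
      exact ⟨fun x hx => Or.inl hx, fun x h => h,
        fun v hv n hn => hcl v hv (List.not_mem_nil) n hn, hnd⟩
    | cons node q =>
      simp only [bfsLoop]
      obtain ⟨M1, M2, ND, L⟩ := foldA_spec (g.getD node []) visited q
      set F := ((g.getD node []).foldl
        (fun (st : PySem.Set Int × List Int) neighbor =>
          if st.1.contains neighbor then st else (PySem.Set.add st.1 neighbor, st.2 ++ [neighbor]))
        (visited, q)) with hF
      obtain ⟨S, Mono, Cl, NDr⟩ := ih F.2 F.1 (ND hnd)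
        (fun x hx => by
          rcases (M2 x).mp hx with hx | ⟨hx1, _⟩
          · exact (M1 x).mpr (Or.inl (hqv x (List.mem_cons_of_mem _ hx)))
          · exact (M1 x).mpr (Or.inr hx1))
        (fun v hv hvq n hn => by
          rcases (M1 v).mp hv with hv1 | hv1
          · by_cases hvnode : v = node
            · subst hvnode
              exact (M1 n).mpr (Or.inr hn)
            · by_cases hvinq : v ∈ q
              · exact absurd ((M2 v).mpr (Or.inl hvinq)) hvq
              · exact (M1 n).mpr (Or.inl (hcl v hv1
                  (fun hm => by rcases List.mem_cons.mp hm with h' | h' <;> [exact hvnode h'; exact hvinq h']) n hn))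
          · by_cases hv2 : v ∈ visited
            · by_cases hvnode : v = node
              · subst hvnode
                exact (M1 n).mpr (Or.inr hn)
              · by_cases hvinq : v ∈ q
                · exact absurd ((M2 v).mpr (Or.inl hvinq)) hvq
                · exact (M1 n).mpr (Or.inl (hcl v hv2
                    (fun hm => by rcases List.mem_cons.mp hm with h' | h' <;> [exact hvnode h'; exact hvinq h']) n hn))
            · exact absurd ((M2 v).mpr (Or.inr ⟨hv1, hv2⟩)) hvq)
        (fun v hv => by
          rcases (M1 v).mp hv with hv1 | hv1
          · exact hsub v hv1
          · exact hU node v hv1)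
        (by simp only [List.length_cons] at hfuel; omega)
      refine ⟨fun x hx => ?_, fun x hx => Mono x ((M1 x).mpr (Or.inl hx)), Cl, NDr⟩
      rcases S x hx with hx1 | ⟨p, hp, hreach⟩
      · rcases (M1 x).mp hx1 with hx2 | hx2
        · exact Or.inl hx2
        · exact Or.inr ⟨node, List.mem_cons_self, Relation.ReflTransGen.single hx2⟩
      · rcases (M2 p).mp hp with hp1 | ⟨hp1, _⟩
        · exact Or.inr ⟨p, List.mem_cons_of_mem _ hp1, hreach⟩
        · exact Or.inr ⟨node, List.mem_cons_self, Relation.ReflTransGen.head hp1 hreach⟩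

theorem nodup_len_eq_iff (l1 l2 : List Int) (h1 : l1.Nodup) (h2 : l2.Nodup)
    (hsub : ∀ x ∈ l1, x ∈ l2) : l1.length = l2.length ↔ ∀ x ∈ l2, x ∈ l1 := by
  constructor
  · intro hl x hx
    have hp := List.Subperm.perm_of_length_le (h1.subperm hsub) (le_of_eq hl.symm)
    exact hp.mem_iff.mpr hx
  · intro hall
    exact ((List.perm_ext_iff_of_nodup h1 h2).mpr
      (fun a => ⟨fun h => hsub a h, fun h => hall a h⟩)).length_eq

-- ===== B-side: the label dict's equality classes are exactly weak connectivity =====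

def GoodComp (comp : PySem.Dict Int Int) (es : List (Int × Int)) : Prop :=
  comp.keys.Nodup ∧
  (∀ k ∈ comp.keys, comp.getD k 0 ∈ comp.keys) ∧
  (∀ e ∈ es, e.1 ∈ comp.keys ∧ e.2 ∈ comp.keys) ∧
  (∀ x ∈ comp.keys, ∀ y ∈ comp.keys, (comp.getD x 0 = comp.getD y 0 ↔ EConn es x y))

theorem good_insert_fresh (comp : PySem.Dict Int Int) (es : List (Int × Int)) (x : Int)
    (hx : x ∉ comp.keys) (hg : GoodComp comp es) :
    GoodComp (comp.insert x x) es ∧ (comp.insert x x).keys = comp.keys ++ [x] := by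
  have hkeys : (comp.insert x x).keys = comp.keys ++ [x] :=
    PySem.Dict.keys_insert_of_not_contains comp x (contains_eq_false_of_not_mem comp x hx)
  obtain ⟨hnd, hval, hends, hiff⟩ := hg
  have hget : ∀ k, (comp.insert x x).getD k 0 = if k = x then x else comp.getD k 0 :=
    fun k => PySem.Dict.getD_insert comp x k x 0
  refine ⟨⟨?_, ?_, ?_, ?_⟩, hkeys⟩
  · rw [hkeys]; exact nodup_append_singleton hnd hx
  · intro k hk
    rw [hkeys] at hk ⊢
    rw [hget k]
    rcases List.mem_append.mp hk with hk | hk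
    · have hkx : k ≠ x := fun he => hx (by rw [← he]; exact hk)
      rw [if_neg hkx]
      exact List.mem_append.mpr (Or.inl (hval k hk))
    · simp only [List.mem_singleton] at hk
      subst hk
      rw [if_pos rfl]
      exact List.mem_append.mpr (Or.inr (by simp))
  · intro e he
    rw [hkeys]
    obtain ⟨h1, h2⟩ := hends e he
    exact ⟨List.mem_append.mpr (Or.inl h1), List.mem_append.mpr (Or.inl h2)⟩
  · intro a ha b hb
    rw [hkeys] at ha hb
    rw [hget a, hget b]
    rcases List.mem_append.mp ha with ha | ha <;> rcases List.mem_append.mp hb with hb | hb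
    · have hax : a ≠ x := fun he => hx (by rw [← he]; exact ha)
      have hbx : b ≠ x := fun he => hx (by rw [← he]; exact hb)
      rw [if_neg hax, if_neg hbx]
      exact hiff a ha b hb
    · simp only [List.mem_singleton] at hb
      have hax : a ≠ x := fun he => hx (by rw [← he]; exact ha)
      rw [if_neg hax, if_pos hb]
      have hbk : b ∉ comp.keys := fun hm => hx (by rw [← hb]; exact hm)
      constructor
      · intro h
        exact absurd (h ▸ hval a ha) hx
      · intro h
        have hba := econn_eq_of_not_mem es comp.keys hends b a hbk (econn_symm es a b h)
        exact absurd (by rw [hba]; exact ha) hbk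
    · simp only [List.mem_singleton] at ha
      have hbx : b ≠ x := fun he => hx (by rw [← he]; exact hb)
      rw [if_pos ha, if_neg hbx]
      have hak : a ∉ comp.keys := fun hm => hx (by rw [← ha]; exact hm)
      constructor
      · intro h
        exact absurd (h.symm ▸ hval b hb) hx
      · intro h
        have hab := econn_eq_of_not_mem es comp.keys hends a b hak h
        exact absurd (by rw [hab]; exact hb) hak
    · simp only [List.mem_singleton] at ha hb
      rw [if_pos ha, if_pos hb]
      exact iff_of_true rfl (by rw [ha.trans hb.symm])

theorem merged_label_iff (c : PySem.Dict Int Int) (es : List (Int × Int)) (p q : Int)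
    (hp : p ∈ c.keys) (hq : q ∈ c.keys)
    (hiff : ∀ x ∈ c.keys, ∀ y ∈ c.keys, (c.getD x 0 = c.getD y 0 ↔ EConn es x y))
    (hab : ¬ c.getD p 0 = c.getD q 0) :
    ∀ x ∈ c.keys, ∀ y ∈ c.keys,
      ((if c.getD x 0 = c.getD q 0 then c.getD p 0 else c.getD x 0)
        = (if c.getD y 0 = c.getD q 0 then c.getD p 0 else c.getD y 0)
        ↔ EConn (es ++ [(p, q)]) x y) := by
  intro x hx y hy
  rw [econn_append es p q x y]
  have ix_p := hiff x hx p hp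
  have ix_q := hiff x hx q hq
  have iy_q := hiff y hy q hq
  have ipy := hiff p hp y hy
  have iqy := hiff q hq y hy
  have ixy := hiff x hx y hy
  by_cases hx1 : c.getD x 0 = c.getD q 0 <;> by_cases hy1 : c.getD y 0 = c.getD q 0
  · rw [if_pos hx1, if_pos hy1]
    exact iff_of_true rfl (Or.inl ((ix_q.mp hx1).trans (econn_symm es y q (iy_q.mp hy1))))
  · rw [if_pos hx1, if_neg hy1]
    constructor
    · intro h
      exact Or.inr (Or.inr ⟨ix_q.mp hx1, ipy.mp h⟩)
    · rintro (h | ⟨h1, h2⟩ | ⟨h1, h2⟩)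
      · exact absurd ((ixy.mpr h).symm.trans hx1) hy1
      · exact absurd ((ix_p.mpr h1).symm.trans hx1) hab
      · exact ipy.mpr h2
  · rw [if_neg hx1, if_pos hy1]
    constructor
    · intro h
      exact Or.inr (Or.inl ⟨ix_p.mp h, econn_symm es y q (iy_q.mp hy1)⟩)
    · rintro (h | ⟨h1, h2⟩ | ⟨h1, h2⟩)
      · exact absurd ((ixy.mpr h).trans hy1) hx1
      · exact ix_p.mpr h1
      · exact absurd (ix_q.mpr h1) hx1
  · rw [if_neg hx1, if_neg hy1]
    constructor
    · exact fun h => Or.inl (ixy.mp h)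
    · rintro (h | ⟨h1, h2⟩ | ⟨h1, h2⟩)
      · exact ixy.mpr h
      · exact absurd (iqy.mpr h2).symm hy1
      · exact absurd (ix_q.mpr h1) hx1

theorem econn_append_swap (es : List (Int × Int)) (u v x y : Int) :
    EConn (es ++ [(u, v)]) x y ↔ EConn (es ++ [(v, u)]) x y := by
  rw [econn_append, econn_append]
  tauto

theorem goodcomp_redundant_edge (c : PySem.Dict Int Int) (es : List (Int × Int)) (node v : Int)
    (hn : node ∈ c.keys) (hv : v ∈ c.keys) (hg : GoodComp c es)
    (hab : c.getD node 0 = c.getD v 0) : GoodComp c (es ++ [(node, v)]) := by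
  obtain ⟨hnd, hval, hends, hiff⟩ := hg
  have hconn : EConn es node v := (hiff node hn v hv).mp hab
  refine ⟨hnd, hval, ?_, ?_⟩
  · intro e he
    rcases List.mem_append.mp he with he | he
    · exact hends e he
    · simp only [List.mem_singleton] at he
      subst he
      exact ⟨hn, hv⟩
  · intro x hx y hy
    rw [hiff x hx y hy, econn_append es node v x y]
    constructor
    · exact Or.inl
    · rintro (h | ⟨h1, h2⟩ | ⟨h1, h2⟩)
      · exact h
      · exact (h1.trans hconn).trans h2
      · exact h1.trans ((econn_symm es node v hconn).trans h2)

-- the class-index half of B's invariant: members lists a label's class exactly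
def MGood (comp : PySem.Dict Int Int) (mem : PySem.Dict Int (List Int)) : Prop :=
  mem.keys.Nodup ∧
  (∀ l, l ∈ mem.keys ↔ ∃ k ∈ comp.keys, comp.getD k 0 = l) ∧
  (∀ l x, x ∈ mem.getD l [] ↔ x ∈ comp.keys ∧ comp.getD x 0 = l)

def Good2 (st : PySem.Dict Int Int × PySem.Dict Int (List Int)) (es : List (Int × Int)) : Prop :=
  GoodComp st.1 es ∧ MGood st.1 st.2

-- relabeling a list of existing keys: keys unchanged, values overwritten pointwise
theorem foldl_insert_keys (ks : List Int) :
    ∀ (c : PySem.Dict Int Int) (A : Int), (∀ k ∈ ks, k ∈ c.keys) →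
      (ks.foldl (fun c k => c.insert k A) c).keys = c.keys := by
  induction ks with
  | nil => exact fun c A _ => rfl
  | cons k t ih =>
    intro c A hks
    simp only [List.foldl_cons]
    have hkeq : (c.insert k A).keys = c.keys :=
      PySem.Dict.keys_insert_of_contains c A
        ((PySem.Dict.contains_iff_mem_keys c k).mpr (hks k List.mem_cons_self))
    rw [ih (c.insert k A) A (fun z hz => by
      rw [hkeq]; exact hks z (List.mem_cons_of_mem _ hz)), hkeq]

theorem foldl_insert_getD (ks : List Int) :
    ∀ (c : PySem.Dict Int Int) (A x : Int),
      (ks.foldl (fun c k => c.insert k A) c).getD x 0 = if x ∈ ks then A else c.getD x 0 := by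
  induction ks with
  | nil => intro c A x; simp
  | cons k t ih =>
    intro c A x
    simp only [List.foldl_cons]
    rw [ih (c.insert k A) A x, PySem.Dict.getD_insert]
    by_cases hxt : x ∈ t
    · rw [if_pos hxt, if_pos (List.mem_cons_of_mem _ hxt)]
    · rw [if_neg hxt]
      by_cases hxk : x = k
      · rw [if_pos hxk, if_pos (by rw [hxk]; exact List.mem_cons_self)]
      · rw [if_neg hxk, if_neg (by
          intro hm
          rcases List.mem_cons.mp hm with hm | hm
          · exact hxk hm
          · exact hxt hm)]

-- erase: keys lose exactly the erased key, lookups of other keys are unchanged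
theorem mem_keys_erase {ν : Type} (d : PySem.Dict Int ν) (k x : Int) :
    x ∈ (d.erase k).keys ↔ x ∈ d.keys ∧ x ≠ k := by
  simp only [PySem.Dict.erase, PySem.Dict.keys, List.mem_map, List.mem_filter]
  constructor
  · rintro ⟨p, ⟨hp, hpk⟩, rfl⟩
    exact ⟨⟨p, hp, rfl⟩, by simpa using hpk⟩
  · rintro ⟨⟨p, hp, rfl⟩, hne⟩
    exact ⟨p, ⟨hp, by simpa using hne⟩, rfl⟩

theorem nodup_keys_erase {ν : Type} (d : PySem.Dict Int ν) (k : Int) (h : d.keys.Nodup) :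
    (d.erase k).keys.Nodup := by
  have hs : (d.erase k).keys.Sublist d.keys := by
    simp only [PySem.Dict.erase, PySem.Dict.keys]
    exact List.Sublist.map _ List.filter_sublist
  exact h.sublist hs

theorem find?_filter_ne {ν : Type} (l : List (Int × ν)) (x k : Int) (hx : x ≠ k) :
    (l.filter (fun p => !(p.1 == k))).find? (fun p => p.1 == x)
      = l.find? (fun p => p.1 == x) := by
  induction l with
  | nil => rfl
  | cons p t ih =>
    by_cases hpk : p.1 = k
    · have hpx : (p.1 == x) = false := by
        simp [hpk]
        exact fun he => hx he.symm
      simp only [List.filter_cons, List.find?]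
      rw [if_neg (by simp [hpk]), hpx]
      exact ih
    · simp only [List.filter_cons, List.find?]
      rw [if_pos (by simpa using hpk)]
      simp only [List.find?]
      cases hpx : (p.1 == x)
      · exact ih
      · rfl

theorem getD_erase {ν : Type} (d : PySem.Dict Int ν) (k x : Int) (dflt : ν) :
    (d.erase k).getD x dflt = if x = k then dflt else d.getD x dflt := by
  by_cases hx : x = k
  · rw [if_pos hx]
    subst hx
    simp only [PySem.Dict.erase, PySem.Dict.getD, PySem.Dict.get?]
    rw [List.find?_eq_none.mpr (by
      intro p hp
      rcases List.mem_filter.mp hp with ⟨_, hpk⟩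
      simpa using hpk)]
    rfl
  · rw [if_neg hx]
    simp only [PySem.Dict.erase, PySem.Dict.getD, PySem.Dict.get?]
    rw [find?_filter_ne d.items x k hx]

theorem good2_ensure (x : Int) (st : PySem.Dict Int Int × PySem.Dict Int (List Int))
    (es : List (Int × Int)) (hg : Good2 st es) :
    Good2 (ensureNode x st) es ∧
    (∀ z, z ∈ (ensureNode x st).1.keys ↔ z ∈ st.1.keys ∨ z = x) := by
  obtain ⟨hgc, hmnd, hmkeys, hmmem⟩ := hg
  simp only [ensureNode]
  by_cases hc : st.1.contains x = true
  · rw [if_pos hc]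
    have hxm := (PySem.Dict.contains_iff_mem_keys st.1 x).mp hc
    refine ⟨⟨hgc, hmnd, hmkeys, hmmem⟩, fun z => ⟨Or.inl, ?_⟩⟩
    rintro (h | rfl)
    · exact h
    · exact hxm
  · rw [if_neg hc]
    have hx : x ∉ st.1.keys := fun h => by
      rw [(PySem.Dict.contains_iff_mem_keys st.1 x).mpr h] at hc
      exact hc rfl
    obtain ⟨hgc1, hkeys1⟩ := good_insert_fresh st.1 es x hx hgc
    have hvalin : ∀ k ∈ st.1.keys, st.1.getD k 0 ∈ st.1.keys := hgc.2.1
    have hxm : x ∉ st.2.keys := fun h => by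
      obtain ⟨k, hk, hkl⟩ := (hmkeys x).mp h
      exact hx (hkl ▸ hvalin k hk)
    have hcget : ∀ z, (st.1.insert x x).getD z 0 = if z = x then x else st.1.getD z 0 :=
      fun z => PySem.Dict.getD_insert st.1 x z x 0
    have hmget : ∀ z, (st.2.insert x [x]).getD z [] = if z = x then [x] else st.2.getD z [] :=
      fun z => PySem.Dict.getD_insert st.2 x z [x] []
    have hmk1 : (st.2.insert x [x]).keys = st.2.keys ++ [x] :=
      PySem.Dict.keys_insert_of_not_contains st.2 [x] (contains_eq_false_of_not_mem st.2 x hxm)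
    refine ⟨⟨hgc1, ?_, ?_, ?_⟩, fun z => by rw [hkeys1]; simp [List.mem_append]⟩
    · rw [hmk1]
      exact nodup_append_singleton hmnd hxm
    · intro l
      rw [hmk1]
      constructor
      · intro hl
        rcases List.mem_append.mp hl with hl | hl
        · obtain ⟨k, hk, hkl⟩ := (hmkeys l).mp hl
          refine ⟨k, by rw [hkeys1]; exact List.mem_append.mpr (Or.inl hk), ?_⟩
          rw [hcget k, if_neg (show ¬ k = x from fun he => hx (by rw [← he]; exact hk))]
          exact hkl
        · simp only [List.mem_singleton] at hl
          subst hl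
          refine ⟨l, by rw [hkeys1]; exact List.mem_append.mpr (Or.inr (by simp)), ?_⟩
          rw [hcget l, if_pos rfl]
      · rintro ⟨k, hk, hkl⟩
        rw [hkeys1] at hk
        rcases List.mem_append.mp hk with hk | hk
        · rw [hcget k, if_neg (show ¬ k = x from fun he => hx (by rw [← he]; exact hk))] at hkl
          exact List.mem_append.mpr (Or.inl ((hmkeys l).mpr ⟨k, hk, hkl⟩))
        · simp only [List.mem_singleton] at hk
          subst hk
          rw [hcget k, if_pos rfl] at hkl
          exact List.mem_append.mpr (Or.inr (by simp [hkl]))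
    · intro l z
      rw [hmget l, hcget z]
      by_cases hlx : l = x
      · rw [if_pos hlx]
        simp only [List.mem_singleton]
        constructor
        · rintro rfl
          refine ⟨by rw [hkeys1]; exact List.mem_append.mpr (Or.inr (by simp)), ?_⟩
          rw [if_pos rfl]
          exact hlx.symm
        · rintro ⟨hz, hzl⟩
          by_cases hzx : z = x
          · exact hzx
          · rw [if_neg hzx] at hzl
            rw [hkeys1] at hz
            rcases List.mem_append.mp hz with hz | hz
            · exfalso
              apply hx
              rw [← hlx, ← hzl]
              exact hvalin z hz
            · simp only [List.mem_singleton] at hz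
              exact hz
      · rw [if_neg hlx, hkeys1]
        rw [hmmem l z]
        constructor
        · rintro ⟨hz, hzl⟩
          refine ⟨List.mem_append.mpr (Or.inl hz), ?_⟩
          rw [if_neg (show ¬ z = x from fun he => hx (by rw [← he]; exact hz))]
          exact hzl
        · rintro ⟨hz, hzl⟩
          rcases List.mem_append.mp hz with hz | hz
          · rw [if_neg (show ¬ z = x from fun he => hx (by rw [← he]; exact hz))] at hzl
            exact ⟨hz, hzl⟩
          · simp only [List.mem_singleton] at hz
            subst hz
            rw [if_pos rfl] at hzl
            exact absurd hzl.symm hlx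

-- merging the class of label B := c q's label into label A := c p's label
theorem good2_merge (c : PySem.Dict Int Int) (mem : PySem.Dict Int (List Int))
    (es : List (Int × Int)) (p q node v : Int)
    (hpq : (p = node ∧ q = v) ∨ (p = v ∧ q = node))
    (hp : p ∈ c.keys) (hq : q ∈ c.keys) (hgc : GoodComp c es) (hm : MGood c mem)
    (hab : ¬ c.getD p 0 = c.getD q 0) :
    Good2 ((mem.getD (c.getD q 0) []).foldl (fun cc k => cc.insert k (c.getD p 0)) c,
      (mem.insert (c.getD p 0) (mem.getD (c.getD p 0) [] ++ mem.getD (c.getD q 0) [])).erase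
        (c.getD q 0)) (es ++ [(node, v)]) ∧
    ((mem.getD (c.getD q 0) []).foldl (fun cc k => cc.insert k (c.getD p 0)) c).keys = c.keys := by
  obtain ⟨hnd, hval, hends, hiff⟩ := hgc
  obtain ⟨hmnd, hmkeys, hmmem⟩ := hm
  set A := c.getD p 0 with hA
  set B := c.getD q 0 with hB
  have hAk : A ∈ c.keys := hval p hp
  have hAm : A ∈ mem.keys := (hmkeys A).mpr ⟨p, hp, rfl⟩
  have hks : ∀ k ∈ mem.getD B [], k ∈ c.keys := fun k hk => ((hmmem B k).mp hk).1
  have hckeys : ((mem.getD B []).foldl (fun cc k => cc.insert k A) c).keys = c.keys :=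
    foldl_insert_keys _ c A hks
  have hcget : ∀ z, ((mem.getD B []).foldl (fun cc k => cc.insert k A) c).getD z 0
      = if z ∈ mem.getD B [] then A else c.getD z 0 := fun z => foldl_insert_getD _ c A z
  -- the pointwise label map on keys
  have hcget' : ∀ z ∈ c.keys, ((mem.getD B []).foldl (fun cc k => cc.insert k A) c).getD z 0
      = if c.getD z 0 = B then A else c.getD z 0 := by
    intro z hz
    rw [hcget z]
    by_cases hzB : c.getD z 0 = B
    · rw [if_pos ((hmmem B z).mpr ⟨hz, hzB⟩), if_pos hzB]
    · rw [if_neg (fun hm' => hzB ((hmmem B z).mp hm').2), if_neg hzB]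
  set c' := (mem.getD B []).foldl (fun cc k => cc.insert k A) c with hc'
  have hnodev : node ∈ c.keys ∧ v ∈ c.keys := by
    rcases hpq with ⟨rfl, rfl⟩ | ⟨rfl, rfl⟩
    · exact ⟨hp, hq⟩
    · exact ⟨hq, hp⟩
  have hnewiff : ∀ x ∈ c.keys, ∀ y ∈ c.keys,
      (c'.getD x 0 = c'.getD y 0 ↔ EConn (es ++ [(node, v)]) x y) := by
    intro x hx y hy
    rw [hcget' x hx, hcget' y hy]
    have hbase := merged_label_iff c es p q hp hq hiff hab x hx y hy
    rcases hpq with ⟨rfl, rfl⟩ | ⟨rfl, rfl⟩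
    · exact hbase
    · exact hbase.trans (econn_append_swap es p q x y)
  -- the new members dict, pointwise
  have hABne : A ≠ B := hab
  set mem' := (mem.insert A (mem.getD A [] ++ mem.getD B [])).erase B with hmem'
  have hmk1 : (mem.insert A (mem.getD A [] ++ mem.getD B [])).keys = mem.keys :=
    PySem.Dict.keys_insert_of_contains mem _ ((PySem.Dict.contains_iff_mem_keys mem A).mpr hAm)
  have hmem'keys : ∀ l, l ∈ mem'.keys ↔ l ∈ mem.keys ∧ l ≠ B := by
    intro l
    rw [hmem', mem_keys_erase, hmk1]
  have hmem'get : ∀ l, mem'.getD l [] = if l = B then [] else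
      if l = A then mem.getD A [] ++ mem.getD B [] else mem.getD l [] := by
    intro l
    rw [hmem', getD_erase, PySem.Dict.getD_insert]
  refine ⟨⟨⟨by rw [hckeys]; exact hnd, ?_, ?_, ?_⟩, ?_, ?_, ?_⟩, hckeys⟩
  · intro k hk
    rw [hckeys] at hk
    rw [hckeys, hcget' k hk]
    split
    · exact hAk
    · exact hval k hk
  · intro e he
    rw [hckeys]
    rcases List.mem_append.mp he with he | he
    · exact hends e he
    · simp only [List.mem_singleton] at he
      subst he
      exact hnodev
  · intro x hx y hy
    rw [hckeys] at hx hy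
    exact hnewiff x hx y hy
  · rw [hmem']
    exact nodup_keys_erase _ B (by rw [hmk1] at *; exact (hmk1 ▸ hmnd))
  · intro l
    rw [hmem'keys l]
    constructor
    · rintro ⟨hl, hlB⟩
      obtain ⟨k, hk, hkl⟩ := (hmkeys l).mp hl
      refine ⟨k, by rw [hckeys]; exact hk, ?_⟩
      rw [hcget' k hk, if_neg (fun he => hlB (hkl ▸ he))]
      exact hkl
    · rintro ⟨k, hk, hkl⟩
      rw [hckeys] at hk
      rw [hcget' k hk] at hkl
      by_cases hkB : c.getD k 0 = B
      · rw [if_pos hkB] at hkl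
        exact ⟨hkl ▸ hAm, hkl ▸ hABne⟩
      · rw [if_neg hkB] at hkl
        exact ⟨(hmkeys l).mpr ⟨k, hk, hkl⟩, fun he => hkB (by rw [hkl, he])⟩
  · intro l z
    rw [hmem'get l]
    by_cases hlB : l = B
    · subst hlB
      rw [if_pos rfl]
      simp only [List.not_mem_nil, false_iff]
      rintro ⟨hz, hzl⟩
      rw [hckeys] at hz
      rw [hcget' z hz] at hzl
      by_cases hzB : c.getD z 0 = B
      · rw [if_pos hzB] at hzl
        exact hABne hzl
      · rw [if_neg hzB] at hzl
        exact hzB hzl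
    · rw [if_neg hlB]
      by_cases hlA : l = A
      · subst hlA
        rw [if_pos rfl]
        simp only [List.mem_append]
        rw [hmmem A z, hmmem B z]
        constructor
        · rintro (⟨hz, hzl⟩ | ⟨hz, hzl⟩)
          · refine ⟨by rw [hckeys]; exact hz, ?_⟩
            rw [hcget' z hz, if_neg (by rw [hzl]; exact hABne)]
            exact hzl
          · refine ⟨by rw [hckeys]; exact hz, ?_⟩
            rw [hcget' z hz, if_pos hzl]
        · rintro ⟨hz, hzl⟩
          rw [hckeys] at hz
          rw [hcget' z hz] at hzl
          by_cases hzB : c.getD z 0 = B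
          · exact Or.inr ⟨hz, hzB⟩
          · rw [if_neg hzB] at hzl
            exact Or.inl ⟨hz, hzl⟩
      · rw [if_neg hlA, hmmem l z]
        constructor
        · rintro ⟨hz, hzl⟩
          refine ⟨by rw [hckeys]; exact hz, ?_⟩
          rw [hcget' z hz, if_neg (fun he => hlB (hzl ▸ he))]
          exact hzl
        · rintro ⟨hz, hzl⟩
          rw [hckeys] at hz
          rw [hcget' z hz] at hzl
          by_cases hzB : c.getD z 0 = B
          · rw [if_pos hzB] at hzl
            exact absurd hzl.symm hlA
          · rw [if_neg hzB] at hzl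
            exact ⟨hz, hzl⟩

theorem good2_unionStep (st : PySem.Dict Int Int × PySem.Dict Int (List Int))
    (es : List (Int × Int)) (node v : Int)
    (hn : node ∈ st.1.keys) (hg : Good2 st es) :
    Good2 (unionStep node st v) (es ++ [(node, v)]) ∧
    (∀ z, z ∈ (unionStep node st v).1.keys ↔ z ∈ st.1.keys ∨ z = v) ∧
    node ∈ (unionStep node st v).1.keys := by
  obtain ⟨hg1, K1⟩ := good2_ensure v st es hg
  have hn1 : node ∈ (ensureNode v st).1.keys := (K1 node).mpr (Or.inl hn)
  have hv1 : v ∈ (ensureNode v st).1.keys := (K1 v).mpr (Or.inr rfl)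
  simp only [unionStep]
  set st1 := ensureNode v st with hst1
  by_cases hab : st1.1.getD node 0 = st1.1.getD v 0
  · have hcond : ¬ ((st1.1.getD node 0 != st1.1.getD v 0) = true) := by simp [hab]
    rw [if_neg hcond]
    obtain ⟨hgc1, hm1⟩ := hg1
    exact ⟨⟨goodcomp_redundant_edge st1.1 es node v hn1 hv1 hgc1 hab, hm1⟩, K1, hn1⟩
  · have hcond : (st1.1.getD node 0 != st1.1.getD v 0) = true := by simp [hab]
    rw [if_pos hcond]
    obtain ⟨hgc1, hm1⟩ := hg1
    by_cases hlt : (st1.2.getD (st1.1.getD node 0) []).length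
        < (st1.2.getD (st1.1.getD v 0) []).length
    · rw [if_pos hlt]
      obtain ⟨hgood, hckeys⟩ := good2_merge st1.1 st1.2 es v node node v
        (Or.inr ⟨rfl, rfl⟩) hv1 hn1 hgc1 hm1 (fun he => hab he.symm)
      refine ⟨hgood, fun z => ?_, by rw [hckeys]; exact hn1⟩
      rw [hckeys]
      exact K1 z
    · rw [if_neg hlt]
      obtain ⟨hgood, hckeys⟩ := good2_merge st1.1 st1.2 es node v node v
        (Or.inl ⟨rfl, rfl⟩) hn1 hv1 hgc1 hm1 hab
      refine ⟨hgood, fun z => ?_, by rw [hckeys]; exact hn1⟩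
      rw [hckeys]
      exact K1 z

theorem good2_inner (node : Int) (nbrs : List Int) :
    ∀ (st : PySem.Dict Int Int × PySem.Dict Int (List Int)) (es : List (Int × Int)),
      node ∈ st.1.keys → Good2 st es →
      Good2 (nbrs.foldl (unionStep node) st) (es ++ nbrs.map (fun v => (node, v))) ∧
      (∀ z, z ∈ (nbrs.foldl (unionStep node) st).1.keys ↔ z ∈ st.1.keys ∨ z ∈ nbrs) := by
  induction nbrs with
  | nil =>
    intro st es _ hg
    exact ⟨by simpa using hg, fun z => by simp⟩
  | cons v t ih =>
    intro st es hn hg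
    simp only [List.foldl_cons, List.map_cons]
    obtain ⟨hg1, K1, hn1⟩ := good2_unionStep st es node v hn hg
    obtain ⟨hg2, K2⟩ := ih (unionStep node st v) (es ++ [(node, v)]) hn1 hg1
    constructor
    · have he : es ++ (node, v) :: t.map (fun v => (node, v))
          = (es ++ [(node, v)]) ++ t.map (fun v => (node, v)) := by simp
      rw [he]
      exact hg2
    · intro z
      rw [K2 z, K1 z]
      simp only [List.mem_cons]
      tauto

theorem good2_outer (items : List (Int × List Int)) :
    ∀ (st : PySem.Dict Int Int × PySem.Dict Int (List Int)) (es : List (Int × Int)),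
      Good2 st es →
      Good2 (items.foldl (fun st p => p.2.foldl (unionStep p.1) (ensureNode p.1 st)) st)
        (es ++ edgesOf items) ∧
      (∀ z, z ∈ (items.foldl (fun st p =>
          p.2.foldl (unionStep p.1) (ensureNode p.1 st)) st).1.keys ↔
        z ∈ st.1.keys ∨ z ∈ nodesOf items) := by
  induction items with
  | nil =>
    intro st es hg
    exact ⟨by simpa [edgesOf] using hg, fun z => by simp [nodesOf]⟩
  | cons p t ih =>
    intro st es hg
    simp only [List.foldl_cons]
    obtain ⟨hgE, KE⟩ := good2_ensure p.1 st es hg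
    have hp1 : p.1 ∈ (ensureNode p.1 st).1.keys := (KE p.1).mpr (Or.inr rfl)
    obtain ⟨hgI, KI⟩ := good2_inner p.1 p.2 _ es hp1 hgE
    obtain ⟨hgO, KO⟩ := ih _ (es ++ p.2.map (fun v => (p.1, v))) hgI
    constructor
    · have he : es ++ edgesOf (p :: t) = (es ++ p.2.map (fun v => (p.1, v))) ++ edgesOf t := by
        simp [edgesOf]
      rw [he]
      exact hgO
    · intro z
      rw [KO z, KI z, KE z, nodesOf_cons]
      simp only [List.mem_cons, List.mem_append]
      tauto

theorem good2_init : Good2 (⟨[]⟩, ⟨[]⟩) [] := by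
  refine ⟨⟨List.nodup_nil, ?_, ?_, ?_⟩, List.nodup_nil, ?_, ?_⟩
  · intro k hk
    exact absurd hk (List.not_mem_nil)
  · intro e he
    exact absurd he (List.not_mem_nil)
  · intro x hx
    exact absurd hx (List.not_mem_nil)
  · intro l
    simp [PySem.Dict.keys]
  · intro l x
    simp [PySem.Dict.keys, PySem.Dict.getD, PySem.Dict.get?]

theorem dict_size_eq_keys_length {ν : Type} (d : PySem.Dict Int ν) :
    d.size = d.keys.length := by
  simp [PySem.Dict.size, PySem.Dict.keys]

-- a nodup list has one element iff it is nonempty with all elements equal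
theorem nodup_length_one_iff (l : List Int) (hnd : l.Nodup) :
    l.length = 1 ↔ l ≠ [] ∧ ∀ x ∈ l, ∀ y ∈ l, x = y := by
  constructor
  · intro h
    obtain ⟨c, hc⟩ := List.length_eq_one_iff.mp h
    subst hc
    refine ⟨by simp, fun x hx y hy => ?_⟩
    simp only [List.mem_singleton] at hx hy
    rw [hx, hy]
  · rintro ⟨hne, hall⟩
    obtain ⟨h0, t0, rfl⟩ := List.exists_cons_of_ne_nil hne
    cases t0 with
    | nil => rfl
    | cons b t'' =>
      exfalso
      have hb := hall b (List.mem_cons_of_mem _ List.mem_cons_self) h0 List.mem_cons_self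
      rcases List.nodup_cons.mp hnd with ⟨hna, _⟩
      exact hna (by rw [← hb]; exact List.mem_cons_self)

theorem forall_conn_iff (E : List (Int × Int)) (K : List Int) (s : Int) (hs : s ∈ K) :
    (∀ x ∈ K, EConn E s x) ↔ (∀ x ∈ K, ∀ y ∈ K, EConn E x y) := by
  constructor
  · intro h x hx y hy
    exact (econn_symm E s x (h x hx)).trans (h y hy)
  · intro h x hx
    exact h s hs x hx

-- ===== VERDICT (by name: the statement is the Claim_ definition above) =====
theorem weakly_connected_spec : Claim_equal_weakly_connected := by
  intro di _
  unfold Spec_weakly_connected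
  apply Bool.coe_iff_coe.mp
  simp only [weakly_connected, weakly_connected_alt]
  by_cases hie : (pyDictOf di).items.isEmpty = true
  · rw [if_pos hie, if_pos hie]
  · rw [if_neg hie, if_neg hie]
    set items := (pyDictOf di).items with hitemsdef
    have hne : items ≠ [] := by
      intro h
      rw [h] at hie
      exact hie rfl
    obtain ⟨q, t, hitems⟩ := List.exists_cons_of_ne_nil hne
    obtain ⟨K, N, M⟩ := build_facts items
    set G := buildUndirected items with hG
    -- the node set is nonempty: the first item's key is a node
    have hq1 : q.1 ∈ nodesOf items := by
      rw [hitems, nodesOf_cons]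
      exact List.mem_cons_self
    -- B's final state: labels + class index
    obtain ⟨hgood, KB⟩ := good2_outer items (⟨[]⟩, ⟨[]⟩) [] good2_init
    set st := items.foldl (fun st p => p.2.foldl (unionStep p.1) (ensureNode p.1 st))
      ((⟨[]⟩, ⟨[]⟩) : PySem.Dict Int Int × PySem.Dict Int (List Int)) with hstdef
    obtain ⟨⟨hndB, hvalB, hendsB, hiffB⟩, hmndB, hmkeysB, hmmemB⟩ := hgood
    have KBmem : ∀ x, x ∈ st.1.keys ↔ x ∈ nodesOf items := by
      intro x
      rw [KB x]
      simp [PySem.Dict.keys]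
    -- B's value: one class label left ↔ all nodes pairwise weakly connected
    have hBiff : (st.2.size == 1) = true ↔
        (∀ x ∈ nodesOf items, ∀ y ∈ nodesOf items, EConn (edgesOf items) x y) := by
      rw [beq_iff_eq, dict_size_eq_keys_length, nodup_length_one_iff st.2.keys hmndB]
      constructor
      · rintro ⟨_, hall⟩ x hx y hy
        rw [← KBmem] at hx hy
        have hlx : st.1.getD x 0 ∈ st.2.keys := (hmkeysB _).mpr ⟨x, hx, rfl⟩
        have hly : st.1.getD y 0 ∈ st.2.keys := (hmkeysB _).mpr ⟨y, hy, rfl⟩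
        exact (hiffB x hx y hy).mp (hall _ hlx _ hly)
      · intro h
        constructor
        · intro hnil
          have hq := (KBmem q.1).mpr hq1
          have hlq : st.1.getD q.1 0 ∈ st.2.keys := (hmkeysB _).mpr ⟨q.1, hq, rfl⟩
          rw [hnil] at hlq
          exact absurd hlq (List.not_mem_nil)
        · intro l1 hl1 l2 hl2
          obtain ⟨k1, hk1, hk1l⟩ := (hmkeysB l1).mp hl1
          obtain ⟨k2, hk2, hk2l⟩ := (hmkeysB l2).mp hl2
          rw [← hk1l, ← hk2l]
          exact (hiffB k1 hk1 k2 hk2).mpr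
            (h k1 ((KBmem k1).mp hk1) k2 ((KBmem k2).mp hk2))
    -- A's value: all keys reached from the first key
    cases hk : G.keys with
    | nil =>
      exfalso
      have := (K q.1).mpr hq1
      rw [hk] at this
      exact absurd this (List.not_mem_nil)
    | cons s rest =>
      have hsU : s ∈ G.keys := by rw [hk]; exact List.mem_cons_self
      have hU : ∀ u v, v ∈ G.getD u [] → v ∈ G.keys := by
        intro u v hv
        exact (K v).mpr (estep_nodes items u v ((M u v).mp hv)).2
      have hUlen : G.keys.length = G.items.length := by
        simp [PySem.Dict.keys]
      have hofl : PySem.Set.ofList [s] = [s] := rfl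
      simp only [bfs, hofl]
      obtain ⟨SA, MonoA, ClA, NDA⟩ := bfsLoop_spec G G.keys hU G.items.length [s] [s]
        (List.nodup_singleton s) (fun p hp => hp)
        (fun v' hv hvq _ _ => absurd hv hvq)
        (fun v' hv => by
          rcases List.mem_cons.mp hv with rfl | hv
          · exact hsU
          · exact absurd hv (List.not_mem_nil))
        (by simp only [List.length_cons, List.length_nil]; omega)
      have memA : ∀ x, x ∈ bfsLoop G G.items.length [s] [s] ↔ Reach G s x := by
        intro x
        constructor
        · intro hx
          rcases SA x hx with hx1 | ⟨p, hp, hreach⟩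
          · rcases List.mem_cons.mp hx1 with rfl | hx1
            · exact Relation.ReflTransGen.refl
            · exact absurd hx1 (List.not_mem_nil)
          · rcases List.mem_cons.mp hp with rfl | hp
            · exact hreach
            · exact absurd hp (List.not_mem_nil)
        · exact reach_mem G _ s x (MonoA s List.mem_cons_self) ClA
      have hsubA : ∀ x ∈ bfsLoop G G.items.length [s] [s], x ∈ G.keys := by
        intro x hx
        exact reach_mem G G.keys s x hsU
          (fun v' hv n hn => hU v' n hn) ((memA x).mp hx)
      rw [beq_iff_eq]
      have hiffA : (bfsLoop G G.items.length [s] [s]).length = G.items.length ↔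
          ∀ x ∈ G.keys, x ∈ bfsLoop G G.items.length [s] [s] := by
        have h0 := nodup_len_eq_iff _ _ NDA N hsubA
        rw [hUlen] at h0
        exact h0
      -- both sides are now statements about EConn on the node set
      rw [hiffA, hBiff]
      have hAconv : (∀ x ∈ G.keys, x ∈ bfsLoop G G.items.length [s] [s]) ↔
          (∀ x ∈ G.keys, EConn (edgesOf items) s x) := by
        constructor
        · intro h x hx
          exact (reach_iff_econn items s x).mp ((memA x).mp (h x hx))
        · intro h x hx
          exact (memA x).mpr ((reach_iff_econn items s x).mpr (h x hx))
      rw [hAconv, forall_conn_iff (edgesOf items) G.keys s hsU]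
      constructor
      · intro h x hx y hy
        exact h x ((K x).mpr hx) y ((K y).mpr hy)
      · intro h x hx y hy
        exact h x ((K x).mp hx) y ((K y).mp hy)
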